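-- pv_equiv track=rewrite | github.com/BohuTANG/explainb-action | src/report_generator.py | format_schema_results
-- ===== SOURCE A (Python) =====
-- from typing import Dict, List, Any
--
-- def format_schema_results(schemas: List[Dict], title: str = "Schema Analysis") -> str:
--     """Format schema results into a readable plan format"""
--     if not schemas:
--         return f"-- {title}\n-- No schema data available"
--
--     lines = [f"-- {title}", "-- " + "="*50]
--
--     # Group by table_schema and table_name
--     tables = {}
--     for item in schemas:
--         table_schema = item.get('table_schema', 'unknown')
--         table_name = item.get('table_name', 'unknown')
--         table_key = f"{table_schema}.{table_name}"
--
--         if table_key not in tables: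
--             tables[table_key] = []
--         tables[table_key].append(item)
--
--     for table_key, columns in tables.items():
--         lines.append(f"-- TABLE: {table_key}")
--         lines.append(f"--   Columns: {len(columns)}")
--
--         for col in sorted(columns, key=lambda x: x.get('column_name', '')):
--             col_name = col.get('column_name', 'unknown')
--             data_type = col.get('data_type', 'unknown')
--             is_nullable = col.get('is_nullable', 'unknown')
--             lines.append(f"--     {col_name}: {data_type} (nullable: {is_nullable})")
--         lines.append("--")
--
--     return '\n'.join(lines)
-- ===== SOURCE B (Python) =====
-- def format_schema_results(schemas, title="Schema Analysis"):
--     """Format schema results into a readable plan format (dedup + per-key filter, no dict grouping)"""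
--     if not schemas:
--         return f"-- {title}\n-- No schema data available"
--
--     def table_key(item):
--         return f"{item.get('table_schema', 'unknown')}.{item.get('table_name', 'unknown')}"
--
--     keys = list(dict.fromkeys(table_key(item) for item in schemas))
--
--     lines = [f"-- {title}", "-- " + "=" * 50]
--     for key in keys:
--         columns = [item for item in schemas if table_key(item) == key]
--         lines.append(f"-- TABLE: {key}")
--         lines.append(f"--   Columns: {len(columns)}")
--         for col in sorted(columns, key=lambda x: x.get('column_name', '')):
--             lines.append(f"--     {col.get('column_name', 'unknown')}: {col.get('data_type', 'unknown')} (nullable: {col.get('is_nullable', 'unknown')})")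
--         lines.append("--")
--     return '\n'.join(lines)
-- ===== Notes on version B (the rewrite author's own statement) =====
-- stated objective: alternative
-- what changed: replaces the dict-based group-by loop with an ordered dedup of the table keys followed by a per-key filter scan over the input, so no grouping dictionary is built
import Mathlib
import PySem

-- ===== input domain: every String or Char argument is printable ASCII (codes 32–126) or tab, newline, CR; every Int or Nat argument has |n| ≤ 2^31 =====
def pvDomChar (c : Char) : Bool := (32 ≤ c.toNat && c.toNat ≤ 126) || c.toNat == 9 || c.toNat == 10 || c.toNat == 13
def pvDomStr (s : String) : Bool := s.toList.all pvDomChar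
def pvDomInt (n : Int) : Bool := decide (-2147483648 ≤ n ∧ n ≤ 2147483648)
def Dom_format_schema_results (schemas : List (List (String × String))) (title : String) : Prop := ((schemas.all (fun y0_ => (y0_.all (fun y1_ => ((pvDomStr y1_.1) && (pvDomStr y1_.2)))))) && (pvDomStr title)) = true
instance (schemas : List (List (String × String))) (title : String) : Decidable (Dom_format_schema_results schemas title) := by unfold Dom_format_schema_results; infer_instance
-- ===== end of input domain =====

-- B replaces A's dict-based group-by with an ordered dedup of table keys plus a per-key
-- filter scan (no grouping dictionary); same output, alternative decomposition.

-- ===== PORT A =====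
-- item.get(k, dflt) on a Python dict (assoc list, first match)
def pvGet (item : List (String × String)) (k dflt : String) : String :=
  (PySem.Dict.mk item).getD k dflt

-- f"{item.get('table_schema','unknown')}.{item.get('table_name','unknown')}"
def pvTableKey (item : List (String × String)) : String :=
  pvGet item "table_schema" "unknown" ++ "." ++ pvGet item "table_name" "unknown"

-- the four lines A appends for one table (header, count, sorted column lines, "--")
def pvTableLines (table_key : String) (columns : List (List (String × String))) : List String :=
  ["-- TABLE: " ++ table_key, "--   Columns: " ++ PySem.Int.toStr (columns.length : Int)]
  ++ (PySem.List.sorted columns (fun x => pvGet x "column_name" "") false).map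
      (fun col => "--     " ++ pvGet col "column_name" "unknown" ++ ": " ++
                  pvGet col "data_type" "unknown" ++ " (nullable: " ++
                  pvGet col "is_nullable" "unknown" ++ ")")
  ++ ["--"]

def format_schema_results (schemas : List (List (String × String))) (title : String) : String :=
  if schemas = [] then "-- " ++ title ++ "\n-- No schema data available"
  else
    let lines0 : List String := ["-- " ++ title, "-- " ++ "=================================================="]
    -- grouping loop: if table_key not in tables: tables[table_key] = []; tables[table_key].append(item)
    let tables : PySem.Dict String (List (List (String × String))) :=
      schemas.foldl (fun d item =>
        let key := pvTableKey item
        let d := if d.contains key then d else d.insert key []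
        d.insert key (d.getD key [] ++ [item])) PySem.Dict.empty
    -- for table_key, columns in tables.items(): append the table's lines
    let lines := tables.items.foldl (fun ls p => ls ++ pvTableLines p.1 p.2) lines0
    PySem.Str.join "\n" lines

-- ===== PORT B =====
def format_schema_results_alt (schemas : List (List (String × String))) (title : String) : String :=
  if schemas = [] then "-- " ++ title ++ "\n-- No schema data available"
  else
    -- keys = list(dict.fromkeys(table_key(item) for item in schemas))
    let keys := PySem.List.dedup (schemas.map pvTableKey)
    let lines : List String :=
      ["-- " ++ title, "-- " ++ "=================================================="]
      ++ keys.flatMap (fun key =>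
           pvTableLines key (schemas.filter (fun item => pvTableKey item == key)))
    PySem.Str.join "\n" lines

-- ===== PRECONDITION & SPEC =====
def Spec_format_schema_results (schemas : List (List (String × String))) (title : String) (out : String) : Prop := out = format_schema_results_alt schemas title
instance (schemas : List (List (String × String))) (title : String) (out : String) : Decidable (Spec_format_schema_results schemas title out) := by unfold Spec_format_schema_results; infer_instance

-- ===== CLAIM (what is proved, stated in full; the proofs are below) =====
def Claim_equal_format_schema_results : Prop := ∀ (schemas : List (List (String × String))) (title : String), Dom_format_schema_results schemas title → Spec_format_schema_results schemas title (format_schema_results schemas title)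

-- ===== LEMMAS AND PROOFS =====

-- A's per-item grouping step is dict-modify with append
theorem pv_step_eq_modify (d : PySem.Dict String (List (List (String × String))))
    (item : List (String × String)) :
    (let key := pvTableKey item
     let d := if d.contains key then d else d.insert key []
     d.insert key (d.getD key [] ++ [item]))
    = d.modify (pvTableKey item) [] (· ++ [item]) := by
  by_cases h : d.contains (pvTableKey item) = true
  · simp only [h, if_true]
    rfl
  · simp only [Bool.not_eq_true] at h
    simp [h, PySem.Dict.getD_insert_self, PySem.Dict.insert_insert_self,
      PySem.Dict.modify, PySem.Dict.getD_of_not_contains d ([] : List (List (String × String))) h]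

-- A's grouping dict, rewritten as the canonical modify-append fold over (key, item) pairs
theorem pv_tables_eq (schemas : List (List (String × String))) :
    (schemas.foldl (fun d item =>
        let key := pvTableKey item
        let d := if d.contains key then d else d.insert key []
        d.insert key (d.getD key [] ++ [item])) PySem.Dict.empty)
    = (schemas.map (fun item => (pvTableKey item, item))).foldl
        (fun d p => d.modify p.1 [] (· ++ [p.2])) PySem.Dict.empty := by
  rw [List.foldl_map]
  have hfun : (fun (d : PySem.Dict String (List (List (String × String)))) item =>
      let key := pvTableKey item
      let d := if d.contains key then d else d.insert key []
      d.insert key (d.getD key [] ++ [item]))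
      = fun d item => d.modify (pvTableKey item) [] (· ++ [item]) :=
    funext fun d => funext fun item => pv_step_eq_modify d item
  rw [hfun]

-- a value of A's dict is exactly B's filter
theorem pv_getD_eq_filter (schemas : List (List (String × String))) (c : String) :
    ((schemas.map (fun item => (pvTableKey item, item))).foldl
        (fun d p => d.modify p.1 [] (· ++ [p.2])) PySem.Dict.empty).getD c []
    = schemas.filter (fun item => pvTableKey item == c) := by
  rw [PySem.Dict.getD_foldl_modify_append]
  simp [List.filter_map, Function.comp_def]

theorem format_schema_results_eq_alt (schemas : List (List (String × String))) (title : String) :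
    format_schema_results schemas title = format_schema_results_alt schemas title := by
  unfold format_schema_results format_schema_results_alt
  by_cases hs : schemas = []
  · simp [hs]
  · simp only [hs, if_false]
    rw [pv_tables_eq]
    have hnd : (((schemas.map (fun item => (pvTableKey item, item))).foldl
        (fun d p => d.modify p.1 [] (· ++ [p.2])) PySem.Dict.empty)).keys.Nodup := by
      have := PySem.Dict.nodup_keys_foldl_modify_key
        (schemas.map (fun item => (pvTableKey item, item)))
        (fun p : String × List (String × String) => p.1)
        ([] : List (List (String × String))) (fun _ p => (· ++ [p.2])) PySem.Dict.empty
        (by simp)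
      simpa using this
    have hkeys : (((schemas.map (fun item => (pvTableKey item, item))).foldl
        (fun d p => d.modify p.1 [] (· ++ [p.2])) PySem.Dict.empty)).keys
        = PySem.List.dedup (schemas.map pvTableKey) := by
      have := PySem.Dict.keys_foldl_modify_key
        (schemas.map (fun item => (pvTableKey item, item)))
        (fun p : String × List (String × String) => p.1)
        ([] : List (List (String × String))) (fun _ p => (· ++ [p.2])) PySem.Dict.empty
      simp only [PySem.Dict.keys_empty] at this
      rw [this]
      simp [pysem, List.map_map, Function.comp_def, PySem.Set.ofList, List.foldl_map]
    rw [PySem.Dict.items_eq_map_keys _ hnd ([] : List (List (String × String)))]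
    rw [hkeys]
    rw [List.foldl_map, PySem.List.foldl_append_eq_flatMap]
    congr 2
    refine List.flatMap_congr ?_
    intro k _
    simp only
    rw [pv_getD_eq_filter]
-- ===== VERDICT (by name: the statement is the Claim_ definition above) =====
theorem format_schema_results_spec : Claim_equal_format_schema_results := by
  intro schemas title _
  unfold Spec_format_schema_results
  exact format_schema_results_eq_alt schemas title
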